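-- pv_equiv track=rewrite | github.com/SomethingOnline/dcu | ca117/revision/AllWeeks/week3/3.1/wordcomps_031.py | is_angle
-- ===== SOURCE A (Python) =====
-- def is_angle(word):
--     angle = "angle"
--     if word == angle:
--         return False
--     for i in word:
--         if i in angle:
--             word = word.replace(i, "", 1)
--             angle = angle.replace(i, "", 1)
--     if len(word) == 0 and len(angle) == 0:
--         return True
--     return False
-- ===== SOURCE B (Python) =====
-- def is_angle(word):
--     return word != "angle" and sorted(word) == sorted("angle")
-- ===== Notes on version B (the rewrite author's own statement) =====
-- stated objective: idiomatic
-- what changed: Replaces the incremental delete-one-matched-letter-at-a-time replace loop over two shrinking strings by a single canonical-form comparison, sorted(word) == sorted("angle"), keeping the not-equal-to-the-target guard.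
import Mathlib
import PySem

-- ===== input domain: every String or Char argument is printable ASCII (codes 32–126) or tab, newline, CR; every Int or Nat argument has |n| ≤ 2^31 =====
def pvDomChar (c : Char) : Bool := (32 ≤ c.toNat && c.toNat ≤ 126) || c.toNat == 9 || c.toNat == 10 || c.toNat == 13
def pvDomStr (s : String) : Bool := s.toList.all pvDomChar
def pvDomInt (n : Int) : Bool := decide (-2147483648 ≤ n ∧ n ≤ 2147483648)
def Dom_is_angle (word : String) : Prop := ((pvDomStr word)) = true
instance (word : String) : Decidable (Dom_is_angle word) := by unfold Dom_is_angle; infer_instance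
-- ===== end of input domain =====

-- B replaces A's incremental replace-matching loop by one sorted-canonical-form comparison (same guard for the literal "angle").

-- ===== PORT A =====
-- Loop body: `if i in angle: word = word.replace(i, "", 1); angle = angle.replace(i, "", 1)`.
-- `s.replace(c, "", 1)` for a single char c deletes the first occurrence of c — exact as List.erase on s.toList.
def pvStepA (st : List Char × List Char) (i : Char) : List Char × List Char :=
  if st.2.contains i then (st.1.erase i, st.2.erase i) else st

-- `for i in word` iterates the ORIGINAL string even though `word` is reassigned inside: fold over word.toList.
def is_angle (word : String) : Bool :=
  let angle := "angle"
  if word == angle then false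
  else
    let st := word.toList.foldl pvStepA (word.toList, angle.toList)
    if st.1.length == 0 && st.2.length == 0 then true else false

-- ===== PORT B =====
-- Source B: return word != "angle" and sorted(word) == sorted("angle")
def is_angle_alt (word : String) : Bool :=
  word != "angle" &&
    (PySem.List.sorted word.toList (fun x => x) false ==
     PySem.List.sorted "angle".toList (fun x => x) false)

-- ===== PRECONDITION & SPEC =====
def Spec_is_angle (word : String) (out : Bool) : Prop := out = is_angle_alt word
instance (word : String) (out : Bool) : Decidable (Spec_is_angle word out) := by unfold Spec_is_angle; infer_instance

-- ===== CLAIM (what is proved, stated in full; the proofs are below) =====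
def Claim_equal_is_angle : Prop := ∀ (word : String), Dom_is_angle word → Spec_is_angle word (is_angle word)

-- ===== LEMMAS AND PROOFS =====

-- A character present in the word-state but absent from the angle-state stays that way forever.
theorem pvStuck (cs : List Char) : ∀ (w a : List Char) (i : Char), i ∈ w → i ∉ a →
    i ∈ (cs.foldl pvStepA (w, a)).1 ∧ i ∉ (cs.foldl pvStepA (w, a)).2 := by
  induction cs with
  | nil => intro w a i hw ha; exact ⟨hw, ha⟩
  | cons j t ih =>
    intro w a i hw ha
    simp only [List.foldl_cons, pvStepA]
    by_cases hj : a.contains j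
    · have hne : i ≠ j := by
        intro h; subst h; exact ha (by simpa using hj)
      simp only [hj, if_pos]
      exact ih (w.erase j) (a.erase j) i
        (List.mem_erase_of_ne hne |>.mpr hw)
        (fun h => ha (List.mem_of_mem_erase h))
    · have hj' : a.contains j = false := by simpa using hj
      simp only [hj', Bool.false_eq_true, if_false]
      exact ih w a i hw ha

-- The loop, started on the full word, ends with both states empty iff the word is a permutation of the target.
theorem pvLoopChar (cs : List Char) : ∀ (a : List Char),
    (((cs.foldl pvStepA (cs, a)).1 = [] ∧ (cs.foldl pvStepA (cs, a)).2 = []) ↔ cs.Perm a) := by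
  induction cs with
  | nil =>
    intro a
    constructor
    · rintro ⟨-, h2⟩
      have h2' : a = [] := h2
      simp [h2']
    · intro h
      exact ⟨rfl, List.perm_nil.mp h.symm⟩
  | cons i t ih =>
    intro a
    by_cases hi : i ∈ a
    · have hc : a.contains i := by simpa using hi
      have herase : (i :: t).erase i = t := by simp
      simp only [List.foldl_cons, pvStepA, hc, if_pos, herase]
      rw [ih (a.erase i)]
      exact (List.cons_perm_iff_perm_erase.trans (by simp [hi])).symm
    · have hc : a.contains i = false := by simpa using hi
      simp only [List.foldl_cons, pvStepA, hc, Bool.false_eq_true, if_false]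
      constructor
      · intro h
        have := (pvStuck t (i :: t) a i (by simp) hi).1
        rw [h.1] at this
        exact absurd this (List.not_mem_nil)
      · intro h
        exact absurd (h.mem_iff.mp (by simp)) hi

theorem is_angle_spec : Claim_equal_is_angle := by
  intro word _
  unfold Spec_is_angle is_angle is_angle_alt
  by_cases h : word = "angle"
  · subst h; simp
  · have hbeq : (word == "angle") = false := by simpa using h
    have hne : (word != "angle") = true := by simp [bne, hbeq]
    simp only [hbeq, Bool.false_eq_true, if_false, hne, Bool.true_and]
    by_cases hp : word.toList.Perm "angle".toList
    · have he := (pvLoopChar word.toList "angle".toList).mpr hp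
      have hs : (PySem.List.sorted word.toList (fun x => x) false ==
          PySem.List.sorted "angle".toList (fun x => x) false) = true := by
        simpa using (PySem.List.sorted_id_eq_sorted_id_iff_perm word.toList "angle".toList).mpr hp
      rw [hs, if_pos (by simp only [Bool.and_eq_true, beq_iff_eq, List.length_eq_zero_iff]; exact he)]
    · have he : ¬ ((word.toList.foldl pvStepA (word.toList, "angle".toList)).1 = [] ∧
          (word.toList.foldl pvStepA (word.toList, "angle".toList)).2 = []) :=
        fun hcontra => hp ((pvLoopChar word.toList "angle".toList).mp hcontra)
      have hs : (PySem.List.sorted word.toList (fun x => x) false ==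
          PySem.List.sorted "angle".toList (fun x => x) false) = false := by
        refine Bool.eq_false_iff.mpr fun hbb => hp ?_
        exact (PySem.List.sorted_id_eq_sorted_id_iff_perm word.toList "angle".toList).mp (by simpa using hbb)
      rw [hs, if_neg (by simp only [Bool.and_eq_true, beq_iff_eq, List.length_eq_zero_iff]; exact he)]
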